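-- pv_equiv track=rewrite | github.com/grasshopperTrainer/coding_practice | baekjoon/accepted/1920 수 찾기.py | solution
-- ===== SOURCE A (Python) =====
-- def solution(nums, pool):
--     result = []
--     pool = set(pool)
--     for n in nums:
--         if n in pool:
--             result.append(1)
--         else:
--             result.append(0)
--     return result
-- ===== SOURCE B (Python) =====
-- def solution(nums, pool):
--     arr = sorted(pool)
--     out = []
--     for n in nums:
--         lo, hi = 0, len(arr)
--         found = 0
--         while lo < hi:
--             mid = (lo + hi) // 2
--             v = arr[mid]
--             if v < n:
--                 lo = mid + 1
--             elif n < v: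
--                 hi = mid
--             else:
--                 found = 1
--                 break
--         out.append(found)
--     return out
-- ===== Notes on version B (the rewrite author's own statement) =====
-- stated objective: alternative
-- what changed: Replaces the hash-set membership test by sorting a copy of the pool once and answering each query with a manual lo/hi binary search over the sorted array.
import Mathlib
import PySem

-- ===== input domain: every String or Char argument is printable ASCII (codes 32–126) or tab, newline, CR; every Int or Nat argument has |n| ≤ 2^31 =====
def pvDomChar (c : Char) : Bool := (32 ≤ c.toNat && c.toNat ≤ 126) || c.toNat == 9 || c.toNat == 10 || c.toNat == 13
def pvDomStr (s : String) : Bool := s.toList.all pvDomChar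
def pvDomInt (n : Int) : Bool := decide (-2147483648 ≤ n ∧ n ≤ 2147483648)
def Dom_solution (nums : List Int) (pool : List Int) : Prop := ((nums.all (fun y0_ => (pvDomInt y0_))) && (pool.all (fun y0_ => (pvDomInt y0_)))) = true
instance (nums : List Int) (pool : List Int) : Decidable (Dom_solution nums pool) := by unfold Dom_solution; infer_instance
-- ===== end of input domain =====

-- B answers each membership query by binary search over a sorted copy of the pool
-- instead of A's hash-set lookups; equivalent on all inputs (alternative algorithm).

-- ===== PORT A =====
def solution (nums : List Int) (pool : List Int) : List Int :=
  let poolSet := PySem.Set.ofList pool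
  nums.foldl (fun result n =>
    if n ∈ poolSet then result ++ [1] else result ++ [0]) []

-- ===== PORT B =====
-- the 'while lo < hi' binary-search loop of Source B, as recursion on hi - lo
-- structural fuel = hi - lo makes the loop total; it only bounds the iteration count
def bsGo (arr : List Int) (n : Int) : Nat → Nat → Nat → Bool
  | 0, _, _ => false
  | fuel + 1, lo, hi =>
    if lo < hi then
      if arr.getD ((lo + hi) / 2) 0 < n then bsGo arr n fuel ((lo + hi) / 2 + 1) hi
      else if n < arr.getD ((lo + hi) / 2) 0 then bsGo arr n fuel lo ((lo + hi) / 2)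
      else true
    else false

def bsearch (arr : List Int) (n : Int) (lo hi : Nat) : Bool :=
  bsGo arr n (hi - lo) lo hi

def solution_alt (nums : List Int) (pool : List Int) : List Int :=
  let arr := PySem.List.sorted pool (fun x => x) false
  nums.foldl (fun out n =>
    out ++ [if bsearch arr n 0 arr.length then (1 : Int) else 0]) []

-- ===== PRECONDITION & SPEC =====
def Spec_solution (nums : List Int) (pool : List Int) (out : List Int) : Prop := out = solution_alt nums pool
instance (nums : List Int) (pool : List Int) (out : List Int) : Decidable (Spec_solution nums pool out) := by unfold Spec_solution; infer_instance

-- ===== CLAIM (what is proved, stated in full; the proofs are below) =====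
def Claim_equal_solution : Prop := ∀ (nums : List Int) (pool : List Int), Dom_solution nums pool → Spec_solution nums pool (solution nums pool)

-- ===== LEMMAS AND PROOFS =====

theorem bsGo_true_iff (arr : List Int) (hs : arr.Pairwise (· ≤ ·)) (n : Int) :
    ∀ (fuel lo hi : Nat), hi - lo ≤ fuel → hi ≤ arr.length →
      (bsGo arr n fuel lo hi = true ↔ ∃ i, lo ≤ i ∧ i < hi ∧ arr.getD i 0 = n) := by
  have hmono : ∀ i j, i ≤ j → j < arr.length → arr.getD i 0 ≤ arr.getD j 0 := by
    intro i j hij hj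
    rcases Nat.lt_or_ge i j with h | h
    · have hi' : i < arr.length := lt_trans h hj
      rw [List.getD_eq_getElem arr 0 hi', List.getD_eq_getElem arr 0 hj]
      exact List.pairwise_iff_getElem.mp hs i j hi' hj h
    · have : i = j := by omega
      simp [this]
  intro fuel
  induction fuel with
  | zero =>
    intro lo hi hf _
    rw [show bsGo arr n 0 lo hi = false from rfl]
    constructor
    · intro h; cases h
    · rintro ⟨i, h1, h2, _⟩; omega
  | succ fuel ih =>
    intro lo hi hf hhi
    by_cases hlt : lo < hi
    · rw [show bsGo arr n (fuel + 1) lo hi =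
          (if arr.getD ((lo + hi) / 2) 0 < n then bsGo arr n fuel ((lo + hi) / 2 + 1) hi
           else if n < arr.getD ((lo + hi) / 2) 0 then bsGo arr n fuel lo ((lo + hi) / 2)
           else true) from by rw [bsGo, if_pos hlt]]
      by_cases hvlt : arr.getD ((lo + hi) / 2) 0 < n
      · rw [if_pos hvlt, ih ((lo + hi) / 2 + 1) hi (by omega) hhi]
        constructor
        · rintro ⟨i, h1, h2, h3⟩; exact ⟨i, by omega, h2, h3⟩
        · rintro ⟨i, h1, h2, h3⟩
          refine ⟨i, ?_, h2, h3⟩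
          by_contra hc
          have : arr.getD i 0 ≤ arr.getD ((lo + hi) / 2) 0 :=
            hmono i ((lo + hi) / 2) (by omega) (by omega)
          omega
      · rw [if_neg hvlt]
        by_cases hnlt : n < arr.getD ((lo + hi) / 2) 0
        · rw [if_pos hnlt, ih lo ((lo + hi) / 2) (by omega) (by omega)]
          constructor
          · rintro ⟨i, h1, h2, h3⟩; exact ⟨i, h1, by omega, h3⟩
          · rintro ⟨i, h1, h2, h3⟩
            refine ⟨i, h1, ?_, h3⟩
            by_contra hc
            have : arr.getD ((lo + hi) / 2) 0 ≤ arr.getD i 0 :=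
              hmono ((lo + hi) / 2) i (by omega) (by omega)
            omega
        · rw [if_neg hnlt]
          have hveq : arr.getD ((lo + hi) / 2) 0 = n := by omega
          constructor
          · intro _; exact ⟨(lo + hi) / 2, by omega, by omega, hveq⟩
          · intro _; rfl
    · rw [show bsGo arr n (fuel + 1) lo hi = false from by rw [bsGo, if_neg hlt]]
      constructor
      · intro h; cases h
      · rintro ⟨i, h1, h2, _⟩; omega

theorem bsearch_true_iff (arr : List Int) (hs : arr.Pairwise (· ≤ ·)) (n : Int)
    (lo hi : Nat) (hhi : hi ≤ arr.length) :
    bsearch arr n lo hi = true ↔ ∃ i, lo ≤ i ∧ i < hi ∧ arr.getD i 0 = n :=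
  bsGo_true_iff arr hs n (hi - lo) lo hi le_rfl hhi

theorem bsearch_eq_mem (pool : List Int) (n : Int) :
    bsearch (PySem.List.sorted pool (fun x => x) false) n 0
      (PySem.List.sorted pool (fun x => x) false).length = decide (n ∈ pool) := by
  set arr := PySem.List.sorted pool (fun x => x) false with harr
  have hs : arr.Pairwise (· ≤ ·) := PySem.List.sorted_pairwise pool (fun x => x)
  have hmem : n ∈ arr ↔ n ∈ pool := (PySem.List.sorted_perm pool (fun x => x) false).mem_iff
  have hiff : bsearch arr n 0 arr.length = true ↔ n ∈ pool := by
    rw [bsearch_true_iff arr hs n 0 arr.length le_rfl]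
    constructor
    · rintro ⟨i, _, hi, hget⟩
      apply hmem.mp
      rw [← hget, List.getD_eq_getElem arr 0 hi]
      exact List.getElem_mem hi
    · intro hn
      obtain ⟨i, hi, hget⟩ := List.mem_iff_getElem.mp (hmem.mpr hn)
      exact ⟨i, Nat.zero_le _, hi, by rw [List.getD_eq_getElem arr 0 hi]; exact hget⟩
  rw [Bool.eq_iff_iff, hiff, decide_eq_true_iff]

theorem step_eq (pool : List Int) (r : List Int) (n : Int) :
    (if n ∈ PySem.Set.ofList pool then r ++ [(1 : Int)] else r ++ [0]) =
      r ++ [if bsearch (PySem.List.sorted pool (fun x => x) false) n 0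
              (PySem.List.sorted pool (fun x => x) false).length then (1 : Int) else 0] := by
  rw [bsearch_eq_mem]
  by_cases h : n ∈ pool
  · simp [h, PySem.Set.mem_ofList]
  · simp [h, PySem.Set.mem_ofList]

-- ===== VERDICT (by name: the statement is the Claim_ definition above) =====
theorem solution_spec : Claim_equal_solution := by
  intro nums pool _
  unfold Spec_solution solution solution_alt
  simp only []
  congr 1
  funext r n
  exact step_eq pool r n
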